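-- pv_equiv track=rewrite | github.com/moisesroth/zip_string | zip_string.py | zip_string
-- ===== SOURCE A (Python) =====
-- def zip_string(s):
--     r = ''
--     f = [ord(x) for x in s] # convert string in array of ascii
--     d = False # dash flag
--
--     for i in range(len(f)):
--         p = False # print flag
--         if i == 0 or i == len(f)-1: # is first or last character
--             p = True
--         elif abs(f[i-1] - f[i]) != 1: # diference between last letter and this letter ir != 1, this indicates non sequencial letter
--             p = True
--         elif abs(f[i+1] - f[i]) != 1: # this verify non sequential letter
--             p = True
--         elif f[i-1] == f[i+1]: # verify if there is a change of sequential direction like "abcDcba"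
--             p = True
--         else: # if no print was detected, print flag is seted to False and dash flag is seted to True
--             p = False
--             d = True
--
--         if p:
--             if d: # if dash flag is True, this will make print a "-" before the next printed letter
--                 r += '-'
--             r += chr(f[i])
--             d = False
--
--     return r
-- ===== SOURCE B (Python) =====
-- def zip_string(s):
--     n = len(s)
--     if n == 0:
--         return ''
--     # run-length view: diffs[k] = ord(s[k+1]) - ord(s[k])
--     diffs = [ord(s[k + 1]) - ord(s[k]) for k in range(n - 1)]
--     out = s[0]
--     i = 0
--     while i < n - 1:
--         d = diffs[i]
--         j = i
--         while j < n - 1 and diffs[j] == d: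
--             j += 1
--         # maximal run s[i..j] with constant step d
--         if abs(d) == 1 and j - i >= 2:
--             out += '-' + s[j]     # interior of a consecutive run is elided
--         else:
--             out += s[i + 1:j + 1] # non-sequential (or too-short) run kept verbatim
--         i = j
--     return out
-- ===== Notes on version B (the rewrite author's own statement) =====
-- stated objective: alternative
-- what changed: A decides keep/drop per character with a persistent dash flag; B run-length-encodes the difference array of adjacent character codes into maximal constant-step runs and emits each run whole: a dash followed by the run's last character when the step is plus-or-minus one and interior characters are elided, otherwise the run's characters verbatim.
import Mathlib
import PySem

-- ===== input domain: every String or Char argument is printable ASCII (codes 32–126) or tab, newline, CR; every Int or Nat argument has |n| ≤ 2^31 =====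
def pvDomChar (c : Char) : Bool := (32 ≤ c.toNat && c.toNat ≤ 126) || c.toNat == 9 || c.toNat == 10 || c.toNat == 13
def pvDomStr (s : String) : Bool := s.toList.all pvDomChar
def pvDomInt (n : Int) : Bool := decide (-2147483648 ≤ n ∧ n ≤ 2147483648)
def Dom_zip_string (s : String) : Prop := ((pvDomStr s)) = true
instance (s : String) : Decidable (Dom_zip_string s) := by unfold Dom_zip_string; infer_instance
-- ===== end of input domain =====

-- B replaces A's per-character keep/drop loop (with its persistent dash flag) by
-- run-length encoding of the difference array: maximal constant-step runs, each emitted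
-- as '-'+last char (step +/-1, something elided) or verbatim; objective: alternative, same O(n).

-- ===== PORT A =====
-- f = [ord(x) for x in s]
def pvOrds (cs : List Char) : List Int := cs.map (fun x => (x.toNat : Int))

-- A's print-flag chain for index i (the if/elif cascade computing p)
def pvP (f : List Int) (i : Nat) : Bool :=
  if i == 0 || i == f.length - 1 then true
  else if (f.getD (i-1) 0 - f.getD i 0).natAbs != 1 then true
  else if (f.getD (i+1) 0 - f.getD i 0).natAbs != 1 then true
  else f.getD (i-1) 0 == f.getD (i+1) 0

-- one iteration of A's for-loop over state (r, d)
def pvStepA (f : List Int) (st : List Char × Bool) (i : Nat) : List Char × Bool :=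
  if pvP f i then
    ((if st.2 then st.1 ++ ['-'] else st.1) ++ [Char.ofNat (f.getD i 0).toNat], false)
  else (st.1, true)

def zip_string (s : String) : String :=
  let f := pvOrds s.toList
  String.ofList ((List.range f.length).foldl (pvStepA f) ([], false)).1

-- ===== PORT B =====
-- diffs = [ord(s[k+1]) - ord(s[k]) for k in range(n-1)]
def pvDiffs (cs : List Char) : List Int :=
  (List.range (cs.length - 1)).map
    (fun k => ((pvOrds cs).getD (k+1) 0) - ((pvOrds cs).getD k 0))

-- inner while: number of steps `while j < n-1 and diffs[j] == d: j += 1` advances, from diffs[j:]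
def pvRunLen (d : Int) : List Int → Nat
  | [] => 0
  | x :: xs => if x = d then pvRunLen d xs + 1 else 0

-- outer while loop, fuel-counted (each iteration advances i by at least 1)
def pvOuter (cs : List Char) (diffs : List Int) : Nat → Nat → List Char → List Char
  | 0, _, out => out
  | fuel+1, i, out =>
    if i < diffs.length then
      let d := diffs.getD i 0
      let j := i + pvRunLen d (diffs.drop i)
      if d.natAbs = 1 ∧ 2 ≤ j - i then
        pvOuter cs diffs fuel j (out ++ ['-', cs.getD j ' '])
      else
        pvOuter cs diffs fuel j (out ++ PySem.List.slice cs (some ((i:Int)+1)) (some ((j:Int)+1)))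
    else out

def zip_string_alt (s : String) : String :=
  let cs := s.toList
  if cs.length = 0 then ""
  else
    let diffs := pvDiffs cs
    String.ofList (pvOuter cs diffs diffs.length 0 [cs.getD 0 ' '])

-- ===== PRECONDITION & SPEC =====
def Spec_zip_string (s : String) (out : String) : Prop := out = zip_string_alt s
instance (s : String) (out : String) : Decidable (Spec_zip_string s out) := by unfold Spec_zip_string; infer_instance

-- ===== CLAIM (what is proved, stated in full; the proofs are below) =====
def Claim_equal_zip_string : Prop := ∀ (s : String), Dom_zip_string s → Spec_zip_string s (zip_string s)

-- ===== LEMMAS AND PROOFS =====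

-- pvStepA threads its output list: the prefix passes through
theorem stepA_frame (f : List Int) (r a : List Char) (d : Bool) (i : Nat) :
    pvStepA f (r ++ a, d) i = (r ++ (pvStepA f (a, d) i).1, (pvStepA f (a, d) i).2) := by
  unfold pvStepA; rcases h : pvP f i <;> rcases d <;> simp

theorem foldA_frame (f : List Int) (l : List Nat) (r a : List Char) (d : Bool) :
    l.foldl (pvStepA f) (r ++ a, d)
      = (r ++ (l.foldl (pvStepA f) (a, d)).1, (l.foldl (pvStepA f) (a, d)).2) := by
  induction l generalizing a d with
  | nil => simp
  | cons x xs ih =>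
      simp only [List.foldl_cons, stepA_frame]
      rw [ih]

theorem outer_frame (cs : List Char) (diffs : List Int) (fuel : Nat) :
    ∀ (i : Nat) (r a : List Char),
      pvOuter cs diffs fuel i (r ++ a) = r ++ pvOuter cs diffs fuel i a := by
  induction fuel with
  | zero => intro i r a; simp [pvOuter]
  | succ fuel ih =>
      intro i r a
      simp only [pvOuter]
      split
      · split
        · rw [List.append_assoc, ih]
        · rw [List.append_assoc, ih]
      · rfl

theorem runLen_spec (d : Int) (l : List Int) :
    pvRunLen d l ≤ l.length
    ∧ (∀ m, m < pvRunLen d l → l.getD m 0 = d)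
    ∧ (pvRunLen d l < l.length → l.getD (pvRunLen d l) 0 ≠ d) := by
  induction l with
  | nil => simp [pvRunLen]
  | cons x xs ih =>
      obtain ⟨h1, h2, h3⟩ := ih
      by_cases hx : x = d
      · refine ⟨?_, ?_, ?_⟩
        · simp [pvRunLen, hx]; omega
        · intro m hm
          simp only [pvRunLen, if_pos hx] at hm
          cases m with
          | zero => simpa using hx
          | succ m => simpa using h2 m (by omega)
        · intro hlt
          simp only [pvRunLen, if_pos hx] at hlt ⊢
          simpa using h3 (by simpa using hlt)
      · refine ⟨by simp [pvRunLen, hx], by simp [pvRunLen, hx], ?_⟩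
        intro _; simpa [pvRunLen, hx] using hx

-- getD over a dropped list
theorem getD_drop (l : List Int) (i m : Nat) :
    (l.drop i).getD m 0 = l.getD (i + m) 0 := by
  simp [List.getD_eq_getElem?_getD, List.getElem?_drop]

-- the difference array reads two adjacent ords
theorem diffs_getD (cs : List Char) (k : Nat) (hk : k < cs.length - 1) :
    (pvDiffs cs).getD k 0 = (pvOrds cs).getD (k+1) 0 - (pvOrds cs).getD k 0 := by
  unfold pvDiffs
  rw [List.getD_eq_getElem?_getD, List.getElem?_map, List.getElem?_range hk]
  rfl

theorem diffs_length (cs : List Char) : (pvDiffs cs).length = cs.length - 1 := by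
  simp [pvDiffs]

theorem ords_length (cs : List Char) : (pvOrds cs).length = cs.length := by
  simp [pvOrds]

-- re-printing a character from its ord
theorem ord_char (cs : List Char) (m : Nat) (hm : m < cs.length) :
    Char.ofNat ((pvOrds cs).getD m 0).toNat = cs.getD m ' ' := by
  rw [List.getD_eq_getElem?_getD, List.getD_eq_getElem?_getD]
  simp [pvOrds, List.getElem?_map, List.getElem?_eq_getElem hm]

theorem pvP_iff (f : List Int) (i : Nat) :
    pvP f i = true ↔ (i = 0 ∨ i = f.length - 1
      ∨ (f.getD (i-1) 0 - f.getD i 0).natAbs ≠ 1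
      ∨ (f.getD (i+1) 0 - f.getD i 0).natAbs ≠ 1
      ∨ f.getD (i-1) 0 = f.getD (i+1) 0) := by
  unfold pvP
  split_ifs with h0 h1 h2 <;> simp_all <;> tauto

theorem pvP_false (cs : List Char) (k : Nat) (d : Int)
    (hd : d.natAbs = 1) (hk0 : 1 ≤ k) (hkn : k < cs.length - 1)
    (h1 : (pvDiffs cs).getD (k-1) 0 = d) (h2 : (pvDiffs cs).getD k 0 = d) :
    pvP (pvOrds cs) k = false := by
  rw [diffs_getD cs (k-1) (by omega)] at h1
  rw [diffs_getD cs k (by omega)] at h2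
  rw [Nat.sub_add_cancel hk0] at h1
  rw [Bool.eq_false_iff, Ne, pvP_iff, ords_length]
  push_neg
  refine ⟨by omega, by omega, by omega, by omega, by omega⟩

theorem pvP_true_run_end (cs : List Char) (j : Nat) (d : Int)
    (hj0 : 1 ≤ j) (hjn : j ≤ cs.length - 1) (hn : 1 ≤ cs.length)
    (h1 : (pvDiffs cs).getD (j-1) 0 = d)
    (hend : j = cs.length - 1 ∨ (j < cs.length - 1 ∧ (pvDiffs cs).getD j 0 ≠ d)) :
    pvP (pvOrds cs) j = true := by
  rw [pvP_iff, ords_length]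
  rcases hend with he | ⟨hlt, hne⟩
  · exact Or.inr (Or.inl he)
  · rw [diffs_getD cs (j-1) (by omega)] at h1
    rw [Nat.sub_add_cancel hj0] at h1
    rw [diffs_getD cs j (by omega)] at hne
    by_cases e1 : ((pvOrds cs).getD (j-1) 0 - (pvOrds cs).getD j 0).natAbs = 1
    · by_cases e2 : ((pvOrds cs).getD (j+1) 0 - (pvOrds cs).getD j 0).natAbs = 1
      · exact Or.inr (Or.inr (Or.inr (Or.inr (by omega))))
      · exact Or.inr (Or.inr (Or.inr (Or.inl e2)))
    · exact Or.inr (Or.inr (Or.inl e1))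

theorem pvP_true_flat (cs : List Char) (k : Nat) (d : Int)
    (hd : d.natAbs ≠ 1) (hk0 : 1 ≤ k) (hkn : k ≤ cs.length - 1) (hn : 1 ≤ cs.length)
    (h1 : (pvDiffs cs).getD (k-1) 0 = d) :
    pvP (pvOrds cs) k = true := by
  rw [pvP_iff, ords_length]
  by_cases he : k = cs.length - 1
  · exact Or.inr (Or.inl he)
  · rw [diffs_getD cs (k-1) (by omega)] at h1
    rw [Nat.sub_add_cancel hk0] at h1
    exact Or.inr (Or.inr (Or.inl (by omega)))

theorem fold_drop (cs : List Char) (a m : Nat)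
    (h : ∀ k, a ≤ k → k < a + m → pvP (pvOrds cs) k = false) (b : Bool) :
    (List.range' a m).foldl (pvStepA (pvOrds cs)) ([], b)
      = ([], b || decide (0 < m)) := by
  induction m generalizing a b with
  | zero => simp
  | succ m ih =>
      rw [List.range'_succ, List.foldl_cons]
      have ha := h a (le_refl a) (by omega)
      rw [show pvStepA (pvOrds cs) ([], b) a = ([], true) by simp [pvStepA, ha]]
      rw [ih (a+1) (fun k hk1 hk2 => h k (by omega) (by omega)) true]
      simp

theorem fold_keep (cs : List Char) (a m : Nat)
    (h : ∀ k, a ≤ k → k < a + m → pvP (pvOrds cs) k = true ∧ k < cs.length) :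
    (List.range' a m).foldl (pvStepA (pvOrds cs)) ([], false)
      = ((List.range' a m).map (fun k => cs.getD k ' '), false) := by
  induction m generalizing a with
  | zero => simp
  | succ m ih =>
      rw [List.range'_succ, List.foldl_cons]
      obtain ⟨hp, hlt⟩ := h a (le_refl a) (by omega)
      have hstep : pvStepA (pvOrds cs) ([], false) a = ([cs.getD a ' '], false) := by
        unfold pvStepA
        rw [hp, ord_char cs a hlt]
        simp
      rw [hstep]
      rw [show ([cs.getD a ' '], false) = (([cs.getD a ' ']) ++ ([] : List Char), false) by simp]
      rw [foldA_frame]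
      rw [ih (a+1) (fun k hk1 hk2 => h k (by omega) (by omega))]
      simp [List.range'_succ]

theorem map_getD_range' (cs : List Char) (a m : Nat) (ham : a + m ≤ cs.length) :
    (List.range' a m).map (fun k => cs.getD k ' ') = (cs.drop a).take m := by
  induction m generalizing a with
  | zero => simp
  | succ m ih =>
      have ha : a < cs.length := by omega
      rw [List.range'_succ, List.map_cons, ih (a+1) (by omega)]
      rw [List.drop_eq_getElem_cons ha, List.take_succ_cons]
      congr 1
      simp [List.getD_eq_getElem?_getD, List.getElem?_eq_getElem ha]
theorem outer_glue (cs : List Char) (diffs : List Int) (fuel j : Nat) (r : List Char) :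
    pvOuter cs diffs fuel j r = r ++ pvOuter cs diffs fuel j [] := by
  have h := outer_frame cs diffs fuel j r []
  simpa using h

theorem main_inv (cs : List Char) (fuel : Nat) :
    ∀ i, i ≤ cs.length - 1 → 1 ≤ cs.length → (pvDiffs cs).length - i ≤ fuel →
      (List.range' (i+1) (cs.length - 1 - i)).foldl (pvStepA (pvOrds cs)) ([], false)
        = (pvOuter cs (pvDiffs cs) fuel i [], false) := by
  induction fuel with
  | zero =>
      intro i hi hn hf
      rw [diffs_length] at hf
      rw [show cs.length - 1 - i = 0 by omega]
      simp [pvOuter]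
  | succ fuel ih =>
      intro i hi hn hf
      have hlen := diffs_length cs
      by_cases hlt : i < (pvDiffs cs).length
      · have hL1 : 1 ≤ pvRunLen ((pvDiffs cs).getD i 0) ((pvDiffs cs).drop i) := by
          obtain ⟨r1, r2, r3⟩ := runLen_spec ((pvDiffs cs).getD i 0) ((pvDiffs cs).drop i)
          rw [List.length_drop] at r1 r3
          by_contra hc
          have h0 : pvRunLen ((pvDiffs cs).getD i 0) ((pvDiffs cs).drop i) = 0 := by omega
          have := r3 (by omega)
          rw [h0, getD_drop] at this
          simp at this
        set d := (pvDiffs cs).getD i 0 with hd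
        set L := pvRunLen d ((pvDiffs cs).drop i) with hL
        obtain ⟨r1, r2, r3⟩ := runLen_spec d ((pvDiffs cs).drop i)
        rw [List.length_drop] at r1 r3
        have hrun : ∀ k, i ≤ k → k < i + L → (pvDiffs cs).getD k 0 = d := by
          intro k hk1 hk2
          have h := r2 (k - i) (by omega)
          rw [getD_drop, Nat.add_sub_cancel' hk1] at h
          exact h
        have hend : i + L = (pvDiffs cs).length
            ∨ (i + L < (pvDiffs cs).length ∧ (pvDiffs cs).getD (i+L) 0 ≠ d) := by
          by_cases hc : L < (pvDiffs cs).length - i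
          · right
            have := r3 hc
            rw [getD_drop] at this
            exact ⟨by omega, this⟩
          · left; omega
        -- split the remaining indices at the run end j = i + L
        rw [hlen] at hend
        have hsplit : List.range' (i+1) (cs.length - 1 - i)
            = List.range' (i+1) (L) ++ List.range' (i+L+1) (cs.length - 1 - (i+L)) := by
          rw [show cs.length - 1 - i = L + (cs.length - 1 - (i+L)) by omega,
              ← List.range'_append, one_mul]
          simp only [show i+1+L = i+L+1 from by omega]
        have hjle : i + L ≤ cs.length - 1 := by omega
        have ihj := ih (i + L) hjle hn (by omega)
        rw [hsplit, List.foldl_append]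
        rw [show pvOuter cs (pvDiffs cs) (fuel+1) i [] =
              (if d.natAbs = 1 ∧ 2 ≤ (i + L) - i then
                pvOuter cs (pvDiffs cs) fuel (i+L) ([] ++ ['-', cs.getD (i+L) ' '])
              else
                pvOuter cs (pvDiffs cs) fuel (i+L)
                  ([] ++ PySem.List.slice cs (some ((i:Int)+1)) (some (((i+L:Nat):Int)+1))))
            from by
          simp only [pvOuter, if_pos hlt, ← hd, ← hL]]
        by_cases hbr : d.natAbs = 1 ∧ 2 ≤ (i + L) - i
        · -- dash branch
          rw [if_pos hbr]
          have hdrop : List.range' (i+1) L = List.range' (i+1) (L-1) ++ [i + L] := by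
            have h := List.range'_concat (s := i+1) (n := L-1) (step := 1)
            simp only [one_mul] at h
            rw [show L - 1 + 1 = L from by omega] at h
            rw [show i + 1 + (L-1) = i + L from by omega] at h
            exact h
          rw [hdrop, List.foldl_append]
          rw [fold_drop cs (i+1) (L-1) (fun k hk1 hk2 =>
            pvP_false cs k d hbr.1 (by omega) (by omega)
              (hrun (k-1) (by omega) (by omega))
              (hrun k (by omega) (by omega))) false]
          rw [show (false || decide (0 < L - 1)) = true by simp; omega]
          simp only [List.foldl_cons, List.foldl_nil]
          have hjlt : i + L < cs.length := by omega
          have hstep : pvStepA (pvOrds cs) ([], true) (i + L)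
              = (['-', cs.getD (i+L) ' '], false) := by
            unfold pvStepA
            rw [pvP_true_run_end cs (i+L) d (by omega) hjle hn
                (by rw [show i + L - 1 = i + (L-1) by omega]
                    exact hrun (i + (L-1)) (by omega) (by omega))
                hend]
            rw [ord_char cs (i+L) hjlt]
            simp
          rw [hstep]
          rw [show (['-', cs.getD (i+L) ' '], false)
                = ((['-', cs.getD (i+L) ' '] : List Char) ++ [], (false : Bool)) by simp]
          rw [foldA_frame, ihj, List.nil_append,
              outer_glue cs (pvDiffs cs) fuel (i+L) ['-', cs.getD (i+L) ' ']]
        · -- verbatim branch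
          rw [if_neg hbr]
          have hkeep : ∀ k, i+1 ≤ k → k < i+1+L → pvP (pvOrds cs) k = true ∧ k < cs.length := by
            intro k hk1 hk2
            refine ⟨?_, by omega⟩
            have hprev : (pvDiffs cs).getD (k-1) 0 = d :=
              hrun (k-1) (by omega) (by omega)
            by_cases hd1 : d.natAbs = 1
            · -- then L = 1, so k = i + L
              have hkL : k = i + L := by omega
              subst hkL
              exact pvP_true_run_end cs (i+L) d (by omega) hjle hn hprev
                hend
            · exact pvP_true_flat cs k d hd1 (by omega) (by omega) hn hprev
          rw [fold_keep cs (i+1) L hkeep]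
          rw [map_getD_range' cs (i+1) L (by omega)]
          have hslice : PySem.List.slice cs (some ((i:Int)+1)) (some (((i+L:Nat):Int)+1))
              = (cs.drop (i+1)).take L := by
            push_cast
            rw [show ((i:Int)+1) = (((i+1:Nat)):Int) by push_cast; ring]
            rw [show ((i:Int)+(L:Int)+1) = (((i+L+1:Nat)):Int) by push_cast; ring]
            rw [PySem.List.slice_natCast]
            congr 1
            omega
          rw [hslice]
          rw [show ((cs.drop (i+1)).take L, (false:Bool))
                = (((cs.drop (i+1)).take L) ++ [], (false : Bool)) by simp]
          rw [foldA_frame, ihj, List.nil_append,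
              outer_glue cs (pvDiffs cs) fuel (i+L) ((cs.drop (i+1)).take L)]
      · rw [diffs_length] at hlt
        rw [show cs.length - 1 - i = 0 by omega]
        simp only [pvOuter, diffs_length]
        rw [if_neg (by omega)]
        simp
theorem zip_string_spec : Claim_equal_zip_string := by
  intro s _
  unfold Spec_zip_string zip_string zip_string_alt
  show String.ofList
        ((List.range (pvOrds s.toList).length).foldl (pvStepA (pvOrds s.toList)) ([], false)).1
      = (if s.toList.length = 0 then ""
         else String.ofList (pvOuter s.toList (pvDiffs s.toList) (pvDiffs s.toList).length 0
                [s.toList.getD 0 ' ']))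
  by_cases h0 : s.toList.length = 0
  · rw [if_pos h0, ords_length, h0]
    simp
  · rw [if_neg h0]
    have hn : 1 ≤ s.toList.length := by omega
    rw [ords_length, List.range_eq_range']
    rw [show s.toList.length = (s.toList.length - 1) + 1 from by omega, List.range'_succ,
        List.foldl_cons]
    have hstep : pvStepA (pvOrds s.toList) ([], false) 0
        = ([s.toList.getD 0 ' '], false) := by
      unfold pvStepA
      rw [show pvP (pvOrds s.toList) 0 = true from by unfold pvP; simp]
      rw [ord_char s.toList 0 (by omega)]
      simp
    rw [hstep]
    rw [show ([s.toList.getD 0 ' '], false)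
          = (([s.toList.getD 0 ' '] : List Char) ++ [], (false : Bool)) by simp]
    rw [foldA_frame]
    have hm := main_inv s.toList (pvDiffs s.toList).length 0 (by omega) hn (by omega)
    rw [Nat.sub_zero] at hm
    rw [show (0+1) = 1 from rfl] at hm
    rw [hm,
        outer_glue s.toList (pvDiffs s.toList) (pvDiffs s.toList).length 0
          [s.toList.getD 0 ' ']]
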